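-- pv_equiv track=rewrite | github.com/Skiller9090/Lucifer | lucifer/Shell/_Options.py | change_auto_parse_args
-- ===== SOURCE A (Python) =====
-- def change_auto_parse_args(com_args):
--     to_set = None
--     set_global = False
--     set_for_new = False
--     inclusive = False
--     for argument in com_args:
--         argument = argument.rstrip()
--         if (argument.lower() == "true"
--                 or argument.lower() == "t" or argument.lower() == "-t"):
--             to_set = True
--         elif (argument.lower() == "false"
--               or argument.lower() == "f" or argument.lower() == "-f"):
--             to_set = False
--         elif argument.lower() == "-g":
--             set_global = True
--         elif argument.lower() == "-n":
--             set_for_new = True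
--         elif argument.lower() == "-i":
--             inclusive = True
--     return inclusive, set_for_new, set_global, to_set
-- ===== SOURCE B (Python) =====
-- def change_auto_parse_args(com_args):
--     args = [a.rstrip().lower() for a in com_args]
--     inclusive = "-i" in args
--     set_for_new = "-n" in args
--     set_global = "-g" in args
--     to_set = None
--     for a in reversed(args):
--         if a in ("true", "t", "-t"):
--             to_set = True
--             break
--         if a in ("false", "f", "-f"):
--             to_set = False
--             break
--     return inclusive, set_for_new, set_global, to_set
-- ===== Notes on version B (the rewrite author's own statement) =====
-- stated objective: simpler
-- what changed: Replaces the single stateful loop with a 5-way elif cascade by one normalization pass, three independent membership tests for the flags, and a separate reversed scan with early break for to_set (last true/false flag wins).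
import Mathlib
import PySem

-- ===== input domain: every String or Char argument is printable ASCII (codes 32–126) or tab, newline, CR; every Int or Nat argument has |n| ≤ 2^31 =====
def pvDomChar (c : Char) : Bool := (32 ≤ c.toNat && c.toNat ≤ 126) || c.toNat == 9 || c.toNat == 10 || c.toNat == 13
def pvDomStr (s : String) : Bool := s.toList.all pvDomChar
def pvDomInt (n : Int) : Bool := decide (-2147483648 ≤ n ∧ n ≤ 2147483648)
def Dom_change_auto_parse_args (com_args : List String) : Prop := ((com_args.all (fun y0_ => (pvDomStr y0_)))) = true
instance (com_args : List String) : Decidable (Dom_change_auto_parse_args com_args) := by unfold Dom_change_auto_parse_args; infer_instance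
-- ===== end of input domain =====

-- ===== PORT A =====
-- B is a different decomposition of the same parse (one normalization pass, independent
-- membership tests, reversed scan for to_set); equal return value, same cost.
-- Literal port of A: one foldl over the state (to_set, set_global, set_for_new, inclusive),
-- each step rstrips the argument and runs the elif cascade on its .lower().
def change_auto_parse_args (com_args : List String) : Bool × Bool × Bool × Option Bool :=
  let st := com_args.foldl
    (fun (s : Option Bool × Bool × Bool × Bool) a =>
      let argument := PySem.Str.rstrip a
      if PySem.Str.lower argument = "true" ∨ PySem.Str.lower argument = "t" ∨
          PySem.Str.lower argument = "-t" then
        (some true, s.2.1, s.2.2.1, s.2.2.2)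
      else if PySem.Str.lower argument = "false" ∨ PySem.Str.lower argument = "f" ∨
          PySem.Str.lower argument = "-f" then
        (some false, s.2.1, s.2.2.1, s.2.2.2)
      else if PySem.Str.lower argument = "-g" then
        (s.1, true, s.2.2.1, s.2.2.2)
      else if PySem.Str.lower argument = "-n" then
        (s.1, s.2.1, true, s.2.2.2)
      else if PySem.Str.lower argument = "-i" then
        (s.1, s.2.1, s.2.2.1, true)
      else s)
    (none, false, false, false)
  (st.2.2.2, st.2.2.1, st.2.1, st.1)

-- ===== PORT B =====
-- reversed scan with early break: first true/false flag of the reversed list wins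
def pvFindToSet : List String → Option Bool
  | [] => none
  | a :: rest =>
    if a = "true" ∨ a = "t" ∨ a = "-t" then some true
    else if a = "false" ∨ a = "f" ∨ a = "-f" then some false
    else pvFindToSet rest

def change_auto_parse_args_alt (com_args : List String) : Bool × Bool × Bool × Option Bool :=
  let args := com_args.map (fun a => PySem.Str.lower (PySem.Str.rstrip a))
  let inclusive := args.contains "-i"
  let set_for_new := args.contains "-n"
  let set_global := args.contains "-g"
  let to_set := pvFindToSet args.reverse
  (inclusive, set_for_new, set_global, to_set)

-- ===== PRECONDITION & SPEC =====
def Spec_change_auto_parse_args (com_args : List String) (out : Bool × Bool × Bool × Option Bool) : Prop := out = change_auto_parse_args_alt com_args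
instance (com_args : List String) (out : Bool × Bool × Bool × Option Bool) : Decidable (Spec_change_auto_parse_args com_args out) := by unfold Spec_change_auto_parse_args; infer_instance

-- ===== CLAIM (what is proved, stated in full; the proofs are below) =====
def Claim_equal_change_auto_parse_args : Prop := ∀ (com_args : List String), Dom_change_auto_parse_args com_args → Spec_change_auto_parse_args com_args (change_auto_parse_args com_args)

-- ===== LEMMAS AND PROOFS =====

lemma pvFindToSet_append (ys zs : List String) :
    pvFindToSet (ys ++ zs) = (pvFindToSet ys).or (pvFindToSet zs) := by
  induction ys with
  | nil => simp [pvFindToSet]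
  | cons a ys ih =>
    simp only [List.cons_append, pvFindToSet]
    split_ifs <;> simp [ih]

/-- Characterisation of A's loop from any start state. -/
lemma loopA_eq (l : List String) (t : Option Bool) (g n i : Bool) :
    l.foldl
      (fun (s : Option Bool × Bool × Bool × Bool) a =>
        let argument := PySem.Str.rstrip a
        if PySem.Str.lower argument = "true" ∨ PySem.Str.lower argument = "t" ∨
            PySem.Str.lower argument = "-t" then
          (some true, s.2.1, s.2.2.1, s.2.2.2)
        else if PySem.Str.lower argument = "false" ∨ PySem.Str.lower argument = "f" ∨
            PySem.Str.lower argument = "-f" then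
          (some false, s.2.1, s.2.2.1, s.2.2.2)
        else if PySem.Str.lower argument = "-g" then
          (s.1, true, s.2.2.1, s.2.2.2)
        else if PySem.Str.lower argument = "-n" then
          (s.1, s.2.1, true, s.2.2.2)
        else if PySem.Str.lower argument = "-i" then
          (s.1, s.2.1, s.2.2.1, true)
        else s)
      (t, g, n, i) =
    (let ks := l.map (fun a => PySem.Str.lower (PySem.Str.rstrip a))
     ((pvFindToSet ks.reverse).or t, g || ks.contains "-g", n || ks.contains "-n",
      i || ks.contains "-i")) := by
  induction l generalizing t g n i with
  | nil => simp [pvFindToSet]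
  | cons a l ih =>
    simp only [List.foldl_cons, List.map_cons, List.reverse_cons, pvFindToSet_append]
    set k := PySem.Str.lower (PySem.Str.rstrip a) with hk
    by_cases h1 : k = "true" ∨ k = "t" ∨ k = "-t"
    · rcases h1 with h | h | h <;>
        simp [h, pvFindToSet, ih]
    · by_cases h2 : k = "false" ∨ k = "f" ∨ k = "-f"
      · rcases h2 with h | h | h <;>
          simp [h, pvFindToSet, ih]
      · by_cases h3 : k = "-g"
        · simp [h3, pvFindToSet, ih]
        · by_cases h4 : k = "-n"
          · simp [h4, pvFindToSet, ih]
          · by_cases h5 : k = "-i"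
            · simp [h5, pvFindToSet, ih]
            · simp [h1, h2, h3, h4, h5, pvFindToSet, ih,
                Ne.symm h3, Ne.symm h4, Ne.symm h5]

-- ===== VERDICT (by name: the statement is the Claim_ definition above) =====
theorem change_auto_parse_args_spec : Claim_equal_change_auto_parse_args := by
  intro com_args _
  unfold Spec_change_auto_parse_args change_auto_parse_args change_auto_parse_args_alt
  simp only [loopA_eq, Option.or_none, Bool.false_or]
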